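-- pv_equiv track=rewrite | github.com/diepi/Connect4_game | connect4_ngocdiepdo.py | Threesome
-- ===== SOURCE A (Python) =====
-- def Threesome(board,who):
--     """
--     The function takes as input a list board representing the Connect Four board.
--     An integer who with possible values 1 or 2.
--     Then it returns True if the player with number who occupies
--     3 adjacent positions which form a horizontal, vertical, or diagonal line.
--     And returns False otherwise.
--     """
--     for r in range(6):
--         for c in range(5):
--             if (board[r][c] == board[r][c+1] == board[r][c+2] == who) and (board[r][c] != 0):
--                 return True
--     for c in range(7):
--         for r in range(4):
--             if (board[r][c] == board[r+1][c] == board[r+2][c] == who) and (board[r][c] != 0):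
--                 return True
--     for r in range(4):
--         for c in range(5):
--             if (board[r][c] == board[r+1][c+1] == board[r+2][c+2]  == who) and (board[r][c] != 0):
--                 return True
--     for r in range(5,1,-1):
--         for c in range(5):
--             if (board[r][c] == board[r-1][c+1] == board[r-2][c+2] == who) and (board[r][c] != 0):
--                 return True
--     return False
-- ===== SOURCE B (Python) =====
-- def Threesome(board, who):
--     # Bitboard algorithm: pack the player's cells into one integer, bit 8*r+c
--     # (the unused 8th column is padding that stops wrap-around between rows).
--     # The mask is built row by row, and after each row a 3-in-a-row in
--     # direction d (1=horizontal, 7=anti-diagonal, 8=vertical, 9=diagonal)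
--     # is detected as m & (m >> d) & (m >> 2*d) != 0.
--     m = 0
--     for r in range(6):
--         for c, v in enumerate(board[r][:7]):
--             if v == who != 0:
--                 m |= 1 << (8 * r + c)
--         for d in (1, 7, 8, 9):
--             if m & (m >> d) & (m >> (2 * d)):
--                 return True
--     return False
-- ===== Notes on version B (the rewrite author's own statement) =====
-- stated objective: alternative
-- what changed: Replaces A's four index-chasing loop nests by the classic Connect-Four bitboard algorithm: the player's cells are packed row by row into a single integer bitmask (with a padding column) and each direction is tested by two shifts and ANDs, m & (m>>d) & (m>>2d).
import Mathlib
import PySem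

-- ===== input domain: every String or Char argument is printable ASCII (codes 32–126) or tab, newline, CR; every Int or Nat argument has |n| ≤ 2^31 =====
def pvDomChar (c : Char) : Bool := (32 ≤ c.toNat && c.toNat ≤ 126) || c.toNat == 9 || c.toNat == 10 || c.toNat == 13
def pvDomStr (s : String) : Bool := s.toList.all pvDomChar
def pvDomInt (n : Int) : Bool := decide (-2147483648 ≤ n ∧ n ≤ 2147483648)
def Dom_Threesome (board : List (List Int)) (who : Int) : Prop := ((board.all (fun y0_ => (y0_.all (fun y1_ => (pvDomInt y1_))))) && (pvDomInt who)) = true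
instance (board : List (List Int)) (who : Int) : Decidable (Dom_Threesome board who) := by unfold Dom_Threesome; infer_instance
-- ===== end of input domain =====

-- B replaces A's four bespoke direction loop nests by the classic Connect-Four bitboard
-- algorithm: one packing pass into an integer bitmask, then each direction is two shifts
-- and ANDs (objective: alternative algorithm; same asymptotic cost on the fixed 6×7 board).

-- ===== PORT A =====
-- board[r][c], totalized with default 0 out of range; Pre_ below admits exactly the inputs
-- on which the Python A returns, and there every access A actually makes is in range, so
-- the port computes exactly the Python's returned value
def pvCell (board : List (List Int)) (r c : Int) : Int :=
  (PySem.List.pyGet? ((PySem.List.pyGet? board r).getD []) c).getD 0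

def Threesome (board : List (List Int)) (who : Int) : Bool :=
  ((PySem.List.pyRange 0 6 1).any fun r =>
    (PySem.List.pyRange 0 5 1).any fun c =>
      (pvCell board r c == pvCell board r (c+1)) && (pvCell board r (c+1) == pvCell board r (c+2))
        && (pvCell board r (c+2) == who) && !(pvCell board r c == 0))
  || ((PySem.List.pyRange 0 7 1).any fun c =>
    (PySem.List.pyRange 0 4 1).any fun r =>
      (pvCell board r c == pvCell board (r+1) c) && (pvCell board (r+1) c == pvCell board (r+2) c)
        && (pvCell board (r+2) c == who) && !(pvCell board r c == 0))
  || ((PySem.List.pyRange 0 4 1).any fun r =>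
    (PySem.List.pyRange 0 5 1).any fun c =>
      (pvCell board r c == pvCell board (r+1) (c+1)) && (pvCell board (r+1) (c+1) == pvCell board (r+2) (c+2))
        && (pvCell board (r+2) (c+2) == who) && !(pvCell board r c == 0))
  || ((PySem.List.pyRange 5 1 (-1)).any fun r =>
    (PySem.List.pyRange 0 5 1).any fun c =>
      (pvCell board r c == pvCell board (r-1) (c+1)) && (pvCell board (r-1) (c+1) == pvCell board (r-2) (c+2))
        && (pvCell board (r-2) (c+2) == who) && !(pvCell board r c == 0))

-- ===== PORT B =====
-- board[r], defaulted to [] out of range; under Pre_ the default is never read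
def pvRow (board : List (List Int)) (r : Int) : List Int :=
  (PySem.List.pyGet? board r).getD []

-- pack row r of the board into the bitmask m: bit 8*r+c is set iff board[r][:7][c] is a
-- nonzero cell equal to who (the bit index is nonnegative, so .toNat is exact); Python's
-- nonnegative arbitrary-precision int m is represented as Nat
def pvPack (board : List (List Int)) (who : Int) (m : Nat) (r : Int) : Nat :=
  (PySem.List.enumerate (PySem.List.slice (pvRow board r) none (some 7))).foldl
    (fun acc cv =>
      if cv.2 == who && !(who == 0) then acc ||| (1 <<< (8*r + cv.1).toNat) else acc) m

-- `for d in (1, 7, 8, 9): if m & (m >> d) & (m >> 2*d): return True`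
def pvChains (m : Nat) : Bool :=
  ([1, 7, 8, 9] : List Nat).any fun d => ((m &&& (m >>> d)) &&& (m >>> (2*d))) != 0

def Threesome_alt (board : List (List Int)) (who : Int) : Bool :=
  ((PySem.List.pyRange 0 6 1).foldl (fun st r =>
      if st.2 then st
      else
        let m := pvPack board who st.1 r
        (m, pvChains m)) ((0 : Nat), false)).2

-- ===== PRECONDITION & SPEC =====
-- the triples of cells A examines, in A's exact traversal order (pass by pass)
def pvLA : List (Int × Int × Int × Int × Int × Int) :=
  [ (0,0,0,1,0,2), (0,1,0,2,0,3), (0,2,0,3,0,4), (0,3,0,4,0,5), (0,4,0,5,0,6),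
    (1,0,1,1,1,2), (1,1,1,2,1,3), (1,2,1,3,1,4), (1,3,1,4,1,5), (1,4,1,5,1,6),
    (2,0,2,1,2,2), (2,1,2,2,2,3), (2,2,2,3,2,4), (2,3,2,4,2,5), (2,4,2,5,2,6),
    (3,0,3,1,3,2), (3,1,3,2,3,3), (3,2,3,3,3,4), (3,3,3,4,3,5), (3,4,3,5,3,6),
    (4,0,4,1,4,2), (4,1,4,2,4,3), (4,2,4,3,4,4), (4,3,4,4,4,5), (4,4,4,5,4,6),
    (5,0,5,1,5,2), (5,1,5,2,5,3), (5,2,5,3,5,4), (5,3,5,4,5,5), (5,4,5,5,5,6),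
    (0,0,1,0,2,0), (1,0,2,0,3,0), (2,0,3,0,4,0), (3,0,4,0,5,0), (0,1,1,1,2,1),
    (1,1,2,1,3,1), (2,1,3,1,4,1), (3,1,4,1,5,1), (0,2,1,2,2,2), (1,2,2,2,3,2),
    (2,2,3,2,4,2), (3,2,4,2,5,2), (0,3,1,3,2,3), (1,3,2,3,3,3), (2,3,3,3,4,3),
    (3,3,4,3,5,3), (0,4,1,4,2,4), (1,4,2,4,3,4), (2,4,3,4,4,4), (3,4,4,4,5,4),
    (0,5,1,5,2,5), (1,5,2,5,3,5), (2,5,3,5,4,5), (3,5,4,5,5,5), (0,6,1,6,2,6),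
    (1,6,2,6,3,6), (2,6,3,6,4,6), (3,6,4,6,5,6), (0,0,1,1,2,2), (0,1,1,2,2,3),
    (0,2,1,3,2,4), (0,3,1,4,2,5), (0,4,1,5,2,6), (1,0,2,1,3,2), (1,1,2,2,3,3),
    (1,2,2,3,3,4), (1,3,2,4,3,5), (1,4,2,5,3,6), (2,0,3,1,4,2), (2,1,3,2,4,3),
    (2,2,3,3,4,4), (2,3,3,4,4,5), (2,4,3,5,4,6), (3,0,4,1,5,2), (3,1,4,2,5,3),
    (3,2,4,3,5,4), (3,3,4,4,5,5), (3,4,4,5,5,6), (5,0,4,1,3,2), (5,1,4,2,3,3),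
    (5,2,4,3,3,4), (5,3,4,4,3,5), (5,4,4,5,3,6), (4,0,3,1,2,2), (4,1,3,2,2,3),
    (4,2,3,3,2,4), (4,3,3,4,2,5), (4,4,3,5,2,6), (3,0,2,1,1,2), (3,1,2,2,1,3),
    (3,2,2,3,1,4), (3,3,2,4,1,5), (3,4,2,5,1,6), (2,0,1,1,0,2), (2,1,1,2,0,3),
    (2,2,1,3,0,4), (2,3,1,4,0,5), (2,4,1,5,0,6) ]

-- is (r,c) an in-range position of the board?
def pvInR (board : List (List Int)) (r c : Int) : Bool :=
  decide (0 ≤ r ∧ r < board.length ∧ 0 ≤ c ∧ c < ((PySem.List.pyGet? board r).getD []).length)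

-- does the step at this triple make an out-of-range access (Python's chained comparison
-- reads the third cell only when the first two compare equal)?
def pvBad (board : List (List Int)) : Int × Int × Int × Int × Int × Int → Bool
  | (r, c, r1, c1, r2, c2) =>
      !pvInR board r c || !pvInR board r1 c1
        || (pvCell board r c == pvCell board r1 c1 && !pvInR board r2 c2)

-- is this triple a full in-range 3-in-a-row hit for who (A returns True here)?
def pvHit (board : List (List Int)) (who : Int) : Int × Int × Int × Int × Int × Int → Bool
  | (r, c, r1, c1, r2, c2) =>
      pvInR board r c && pvInR board r1 c1 && pvInR board r2 c2
        && (pvCell board r c == pvCell board r1 c1) && (pvCell board r1 c1 == pvCell board r2 c2)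
        && (pvCell board r2 c2 == who) && !(pvCell board r c == 0)

-- exactly the inputs on which the Python A returns: no step of A's traversal that precedes
-- its first hit (where A returns True) makes an out-of-range access (raises IndexError)
def Pre_Threesome (board : List (List Int)) (who : Int) : Prop :=
  ((pvLA.takeWhile fun t => !pvHit board who t).all fun t => !pvBad board t) = true
instance (board : List (List Int)) (who : Int) : Decidable (Pre_Threesome board who) := by
  unfold Pre_Threesome; infer_instance

def pvWitness_Threesome : List (List Int) × Int :=
  ([[0,0,0,0,0,0,0],[0,0,0,0,0,0,0],[0,0,0,0,0,0,0],[0,0,0,0,0,0,0],[0,0,0,0,0,0,0],[0,0,1,2,1,0,0]], 1)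

def Spec_Threesome (board : List (List Int)) (who : Int) (out : Bool) : Prop := out = Threesome_alt board who
instance (board : List (List Int)) (who : Int) (out : Bool) : Decidable (Spec_Threesome board who out) := by unfold Spec_Threesome; infer_instance

-- ===== CLAIM (what is proved, stated in full; the proofs are below) =====
def Claim_equal_Threesome : Prop := ∀ (board : List (List Int)) (who : Int), Dom_Threesome board who → Pre_Threesome board who → Spec_Threesome board who (Threesome board who)

-- ===== LEMMAS AND PROOFS =====

theorem pv_beq_decide (a b : Nat) : (a == b) = decide (a = b) := by
  by_cases h : a = b
  · subst h; simp
  · simp [h]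

-- the full-window mask: every row packed, no early exit
def pvMask2 (board : List (List Int)) (who : Int) : Nat :=
  (PySem.List.pyRange 0 6 1).foldl (pvPack board who) 0

theorem pv_get_some {alpha : Type} (xs : List alpha) (i : Int) (h0 : 0 ≤ i)
    (hl : i < (xs.length : Int)) :
    PySem.List.pyGet? xs i = some (xs[i.toNat]'(by omega)) := by
  simp only [PySem.List.pyGet?, PySem.List.pyIdx?, if_pos h0, if_pos hl, Option.bind_some]
  exact List.getElem?_eq_getElem (by omega)

theorem pv_get_none {alpha : Type} (xs : List alpha) (i : Int) (h0 : 0 ≤ i)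
    (hl : ¬ i < (xs.length : Int)) :
    PySem.List.pyGet? xs i = none := by
  simp only [PySem.List.pyGet?, PySem.List.pyIdx?, if_pos h0, if_neg hl]
  rfl

-- pvCell through the row accessor, definitionally
theorem pv_cell_row (board : List (List Int)) (r c : Int) :
    pvCell board r c = (PySem.List.pyGet? (pvRow board r) c).getD 0 := rfl

theorem pv_testBit_pack (board : List (List Int)) (who : Int) (r : Int)
    (m : Nat) (b : Nat) :
    ((pvPack board who m r).testBit b)
      = (m.testBit b
          || (PySem.List.enumerate (PySem.List.slice (pvRow board r) none (some 7))).any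
              fun cv => (cv.2 == who && !(who == 0)) && ((8*r + cv.1).toNat == b)) := by
  unfold pvPack
  generalize PySem.List.enumerate (PySem.List.slice (pvRow board r) none (some 7)) = L
  induction L generalizing m with
  | nil => simp
  | cons x L ih =>
      simp only [List.foldl_cons, List.any_cons, ih]
      by_cases h : (x.2 == who && !(who == 0)) = true
      · simp [h, Nat.shiftLeft_eq, Nat.testBit_or, Nat.testBit_two_pow, Bool.or_assoc,
          pv_beq_decide]
      · simp [h]

theorem pv_testBit_foldl_pack (board : List (List Int)) (who : Int) (L : List Int)
    (m : Nat) (b : Nat) :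
    ((L.foldl (pvPack board who) m).testBit b)
      = (m.testBit b
          || L.any fun r =>
              (PySem.List.enumerate (PySem.List.slice (pvRow board r) none (some 7))).any
                fun cv => (cv.2 == who && !(who == 0)) && ((8*r + cv.1).toNat == b)) := by
  induction L generalizing m with
  | nil => simp
  | cons r L ih => simp only [List.foldl_cons, List.any_cons, ih, pv_testBit_pack,
      Bool.or_assoc]

-- bit b of the full mask is set iff it encodes an in-window cell holding who (nonzero)
theorem pv_testBit_mask2 (board : List (List Int)) (who : Int) (b : Nat) :
    (pvMask2 board who).testBit b = true
      ↔ ∃ r c : Int, 0 ≤ r ∧ r < 6 ∧ 0 ≤ c ∧ c < 7 ∧ pvCell board r c = who ∧ who ≠ 0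
          ∧ b = (8*r+c).toNat := by
  rw [pvMask2, pv_testBit_foldl_pack]
  simp only [Nat.zero_testBit, Bool.false_or, List.any_eq_true, Bool.and_eq_true,
    beq_iff_eq, Bool.not_eq_true', PySem.List.mem_pyRange_one]
  constructor
  · rintro ⟨r, ⟨hr0, hr6⟩, cv, hcv, ⟨hval, hw⟩, hb⟩
    rw [PySem.List.slice_to _ (by omega), PySem.List.mem_enumerate_iff] at hcv
    obtain ⟨k, hk, rfl⟩ := hcv
    have hk7 : k < 7 := by
      have := hk; rw [List.length_take] at this; omega
    have hklen : k < (pvRow board r).length := by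
      have := hk; rw [List.length_take] at this; omega
    have hcell : pvCell board r (k : Int) = who := by
      rw [pv_cell_row, pv_get_some (pvRow board r) (k : Int) (by omega) (by exact_mod_cast hklen)]
      simp only [Option.getD_some, Int.toNat_natCast]
      rw [← hval]
      simp [List.getElem_take]
    refine ⟨r, (k : Int), hr0, hr6, by omega, by omega, hcell, by simpa using hw, ?_⟩
    simp only [zero_add] at hb
    omega
  · rintro ⟨r, c, h1, h2, h3, h4, hcell, hw, hb⟩
    rw [pv_cell_row] at hcell
    have hlt : c < ((pvRow board r).length : Int) := by
      by_contra hge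
      rw [pv_get_none (pvRow board r) c h3 hge] at hcell
      simp only [Option.getD_none] at hcell
      exact hw hcell.symm
    rw [pv_get_some (pvRow board r) c h3 hlt, Option.getD_some] at hcell
    refine ⟨r, ⟨h1, h2⟩, ((c.toNat : Int), (pvRow board r)[c.toNat]'(by omega)), ?_, ?_, ?_⟩
    · rw [PySem.List.slice_to _ (by omega), PySem.List.mem_enumerate_iff]
      have hkt : c.toNat < ((pvRow board r).take 7).length := by
        rw [List.length_take]; omega
      exact ⟨c.toNat, hkt, by simp [List.getElem_take]⟩
    · constructor
      · simpa using hcell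
      · simpa using hw
    · simp only
      omega

theorem pv_exists_testBit (n : Nat) (h : n ≠ 0) : ∃ b, n.testBit b = true := by
  by_contra hc
  push_neg at hc
  exact h (Nat.eq_of_testBit_eq fun i => by simp [Bool.eq_false_iff.mpr (hc i)])

theorem pv_and_ne (m d : Nat) :
    (((m &&& (m >>> d)) &&& (m >>> (2*d))) != 0) = true
      ↔ ∃ b, m.testBit b = true ∧ m.testBit (b+d) = true ∧ m.testBit (b+2*d) = true := by
  rw [bne_iff_ne]
  constructor
  · intro h
    obtain ⟨b, hb⟩ := pv_exists_testBit _ h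
    rw [Nat.testBit_and, Nat.testBit_and, Nat.testBit_shiftRight, Nat.testBit_shiftRight] at hb
    simp only [Bool.and_eq_true] at hb
    exact ⟨b, hb.1.1, by rw [Nat.add_comm]; exact hb.1.2, by rw [Nat.add_comm]; exact hb.2⟩
  · rintro ⟨b, h1, h2, h3⟩ h0
    have : ((m &&& (m >>> d)) &&& (m >>> (2*d))).testBit b = true := by
      rw [Nat.testBit_and, Nat.testBit_and, Nat.testBit_shiftRight, Nat.testBit_shiftRight,
        Nat.add_comm d b, Nat.add_comm (2*d) b]
      simp [h1, h2, h3]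
    rw [h0] at this
    simp at this

-- chains are monotone in the mask (adding bits never destroys a chain)
theorem pv_chains_mono (m m' : Nat)
    (hsub : ∀ b, m.testBit b = true → m'.testBit b = true)
    (h : pvChains m = true) : pvChains m' = true := by
  unfold pvChains at *
  simp only [List.any_eq_true] at h ⊢
  obtain ⟨d, hd, hc⟩ := h
  rcases (pv_and_ne m d).mp hc with ⟨b, h1, h2, h3⟩
  exact ⟨d, hd, (pv_and_ne m' d).mpr ⟨b, hsub _ h1, hsub _ h2, hsub _ h3⟩⟩

theorem pv_foldl_pack_mono (board : List (List Int)) (who : Int) (L : List Int)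
    (m : Nat) (b : Nat) (h : m.testBit b = true) :
    (L.foldl (pvPack board who) m).testBit b = true := by
  rw [pv_testBit_foldl_pack, h]
  rfl

-- once True is found the row fold keeps it
theorem pv_foldl_true (board : List (List Int)) (who : Int) (L : List Int) (m : Nat) :
    (L.foldl (fun st r =>
        if st.2 then st
        else
          let m' := pvPack board who st.1 r
          (m', pvChains m')) (m, true)) = (m, true) := by
  induction L with
  | nil => rfl
  | cons r L ih => simpa using ih

-- the early-exit row fold answers exactly the chain test on the fully packed mask
theorem pv_foldl_snd (board : List (List Int)) (who : Int) (L : List Int) (m : Nat)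
    (hm : pvChains m = false) :
    (L.foldl (fun st r =>
        if st.2 then st
        else
          let m' := pvPack board who st.1 r
          (m', pvChains m')) (m, false)).2
      = pvChains (L.foldl (pvPack board who) m) := by
  induction L generalizing m with
  | nil => simpa using hm.symm
  | cons r L ih =>
      simp only [List.foldl_cons]
      by_cases hc : pvChains (pvPack board who m r) = true
      · simp only [hm, if_neg Bool.false_ne_true, hc]
        rw [pv_foldl_true]
        exact (pv_chains_mono _ _ (fun b hb => pv_foldl_pack_mono board who L _ b hb) hc).symm
      · simp only [hm, if_neg Bool.false_ne_true, Bool.not_eq_true] at hc ⊢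
        rw [hc]
        exact ih _ hc

-- B as a proposition: some direction has a 3-chain of set bits in the full mask
theorem pvB_iff (board : List (List Int)) (who : Int) :
    Threesome_alt board who = true
      ↔ ∃ d ∈ ([1, 7, 8, 9] : List Nat), ∃ b,
          (pvMask2 board who).testBit b = true ∧ (pvMask2 board who).testBit (b+d) = true
            ∧ (pvMask2 board who).testBit (b+2*d) = true := by
  unfold Threesome_alt
  rw [pv_foldl_snd board who _ 0 (by rfl)]
  rw [show (PySem.List.pyRange 0 6 1).foldl (pvPack board who) 0 = pvMask2 board who from rfl]
  unfold pvChains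
  simp only [List.any_eq_true]
  constructor
  · rintro ⟨d, hd, h⟩; exact ⟨d, hd, (pv_and_ne _ d).mp h⟩
  · rintro ⟨d, hd, h⟩; exact ⟨d, hd, (pv_and_ne _ d).mpr h⟩

-- decode one set bit into its cell
theorem pv_decode (board : List (List Int)) (who : Int) (b : Nat)
    (h : (pvMask2 board who).testBit b = true) :
    ∃ r c : Int, 0 ≤ r ∧ r < 6 ∧ 0 ≤ c ∧ c < 7 ∧ pvCell board r c = who ∧ who ≠ 0
      ∧ b = (8*r+c).toNat :=
  (pv_testBit_mask2 board who b).mp h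

theorem pv_encode (board : List (List Int)) (who : Int) (r c : Int) (hw : who ≠ 0)
    (h1 : 0 ≤ r) (h2 : r < 6) (h3 : 0 ≤ c) (h4 : c < 7) (h5 : pvCell board r c = who) :
    (pvMask2 board who).testBit (8*r+c).toNat = true :=
  (pv_testBit_mask2 board who _).mpr ⟨r, c, h1, h2, h3, h4, h5, hw, rfl⟩

-- A as a proposition: its four passes as bounded existentials
theorem pvA_iff (board : List (List Int)) (who : Int) :
    Threesome board who = true
      ↔ (∃ r c : Int, 0 ≤ r ∧ r < 6 ∧ 0 ≤ c ∧ c < 5 ∧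
            pvCell board r c = pvCell board r (c+1) ∧ pvCell board r (c+1) = pvCell board r (c+2)
              ∧ pvCell board r (c+2) = who ∧ pvCell board r c ≠ 0)
        ∨ (∃ c r : Int, 0 ≤ c ∧ c < 7 ∧ 0 ≤ r ∧ r < 4 ∧
            pvCell board r c = pvCell board (r+1) c ∧ pvCell board (r+1) c = pvCell board (r+2) c
              ∧ pvCell board (r+2) c = who ∧ pvCell board r c ≠ 0)
        ∨ (∃ r c : Int, 0 ≤ r ∧ r < 4 ∧ 0 ≤ c ∧ c < 5 ∧
            pvCell board r c = pvCell board (r+1) (c+1) ∧ pvCell board (r+1) (c+1) = pvCell board (r+2) (c+2)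
              ∧ pvCell board (r+2) (c+2) = who ∧ pvCell board r c ≠ 0)
        ∨ (∃ r c : Int, 1 < r ∧ r ≤ 5 ∧ 0 ≤ c ∧ c < 5 ∧
            pvCell board r c = pvCell board (r-1) (c+1) ∧ pvCell board (r-1) (c+1) = pvCell board (r-2) (c+2)
              ∧ pvCell board (r-2) (c+2) = who ∧ pvCell board r c ≠ 0) := by
  unfold Threesome
  simp only [Bool.or_eq_true, List.any_eq_true, PySem.List.mem_pyRange_one,
    PySem.List.mem_pyRange_neg_one, Bool.and_eq_true, beq_iff_eq, Bool.not_eq_true',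
    or_assoc]
  constructor
  · rintro (⟨r, hr, c, hc, h⟩ | ⟨c, hc, r, hr, h⟩ | ⟨r, hr, c, hc, h⟩ | ⟨r, hr, c, hc, h⟩)
    · exact Or.inl ⟨r, c, hr.1, hr.2, hc.1, hc.2, h.1.1.1, h.1.1.2, h.1.2, by simpa using h.2⟩
    · exact Or.inr (Or.inl ⟨c, r, hc.1, hc.2, hr.1, hr.2, h.1.1.1, h.1.1.2, h.1.2, by simpa using h.2⟩)
    · exact Or.inr (Or.inr (Or.inl ⟨r, c, hr.1, hr.2, hc.1, hc.2, h.1.1.1, h.1.1.2, h.1.2, by simpa using h.2⟩))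
    · exact Or.inr (Or.inr (Or.inr ⟨r, c, hr.1, hr.2, hc.1, hc.2, h.1.1.1, h.1.1.2, h.1.2, by simpa using h.2⟩))
  · rintro (⟨r, c, h1, h2, h3, h4, h⟩ | ⟨c, r, h1, h2, h3, h4, h⟩ | ⟨r, c, h1, h2, h3, h4, h⟩ | ⟨r, c, h1, h2, h3, h4, h⟩)
    · exact Or.inl ⟨r, ⟨h1, h2⟩, c, ⟨h3, h4⟩, ⟨⟨⟨h.1, h.2.1⟩, h.2.2.1⟩, by simpa using h.2.2.2⟩⟩
    · exact Or.inr (Or.inl ⟨c, ⟨h1, h2⟩, r, ⟨h3, h4⟩, ⟨⟨⟨h.1, h.2.1⟩, h.2.2.1⟩, by simpa using h.2.2.2⟩⟩)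
    · exact Or.inr (Or.inr (Or.inl ⟨r, ⟨h1, h2⟩, c, ⟨h3, h4⟩, ⟨⟨⟨h.1, h.2.1⟩, h.2.2.1⟩, by simpa using h.2.2.2⟩⟩))
    · exact Or.inr (Or.inr (Or.inr ⟨r, ⟨h1, h2⟩, c, ⟨h3, h4⟩, ⟨⟨⟨h.1, h.2.1⟩, h.2.2.1⟩, by simpa using h.2.2.2⟩⟩))

-- ===== VERDICT (by name: the statement is the Claim_ definition above) =====
theorem Threesome_spec : Claim_equal_Threesome := by
  intro board who _ _
  unfold Spec_Threesome
  rw [Bool.eq_iff_iff, pvA_iff, pvB_iff]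
  constructor
  · rintro (⟨r, c, h1, h2, h3, h4, e1, e2, e3, e4⟩ | ⟨c, r, h1, h2, h3, h4, e1, e2, e3, e4⟩ |
      ⟨r, c, h1, h2, h3, h4, e1, e2, e3, e4⟩ | ⟨r, c, h1, h2, h3, h4, e1, e2, e3, e4⟩)
    · have hw : who ≠ 0 := by rw [e1, e2, e3] at e4; exact e4
      refine ⟨1, by simp, (8*r+c).toNat, ?_, ?_, ?_⟩
      · exact pv_encode board who r c hw h1 h2 h3 (by omega) (by rw [e1, e2]; exact e3)
      · have : (8*r+c).toNat + 1 = (8*r+(c+1)).toNat := by omega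
        rw [this]; exact pv_encode board who r (c+1) hw h1 h2 (by omega) (by omega) (by rw [e2]; exact e3)
      · have : (8*r+c).toNat + 2*1 = (8*r+(c+2)).toNat := by omega
        rw [this]; exact pv_encode board who r (c+2) hw h1 h2 (by omega) (by omega) e3
    · have hw : who ≠ 0 := by rw [e1, e2, e3] at e4; exact e4
      refine ⟨8, by simp, (8*r+c).toNat, ?_, ?_, ?_⟩
      · exact pv_encode board who r c hw h3 (by omega) h1 h2 (by rw [e1, e2]; exact e3)
      · have : (8*r+c).toNat + 8 = (8*(r+1)+c).toNat := by omega
        rw [this]; exact pv_encode board who (r+1) c hw (by omega) (by omega) h1 h2 (by rw [e2]; exact e3)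
      · have : (8*r+c).toNat + 2*8 = (8*(r+2)+c).toNat := by omega
        rw [this]; exact pv_encode board who (r+2) c hw (by omega) (by omega) h1 h2 e3
    · have hw : who ≠ 0 := by rw [e1, e2, e3] at e4; exact e4
      refine ⟨9, by simp, (8*r+c).toNat, ?_, ?_, ?_⟩
      · exact pv_encode board who r c hw h1 (by omega) h3 (by omega) (by rw [e1, e2]; exact e3)
      · have : (8*r+c).toNat + 9 = (8*(r+1)+(c+1)).toNat := by omega
        rw [this]; exact pv_encode board who (r+1) (c+1) hw (by omega) (by omega) (by omega) (by omega) (by rw [e2]; exact e3)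
      · have : (8*r+c).toNat + 2*9 = (8*(r+2)+(c+2)).toNat := by omega
        rw [this]; exact pv_encode board who (r+2) (c+2) hw (by omega) (by omega) (by omega) (by omega) e3
    · -- A's up-right diagonal: the lowest bit of the chain is the topmost cell (r-2, c+2)
      have hw : who ≠ 0 := by rw [e1, e2, e3] at e4; exact e4
      refine ⟨7, by simp, (8*(r-2)+(c+2)).toNat, ?_, ?_, ?_⟩
      · exact pv_encode board who (r-2) (c+2) hw (by omega) (by omega) (by omega) (by omega) e3
      · have : (8*(r-2)+(c+2)).toNat + 7 = (8*(r-1)+(c+1)).toNat := by omega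
        rw [this]; exact pv_encode board who (r-1) (c+1) hw (by omega) (by omega) (by omega) (by omega) (by rw [e2]; exact e3)
      · have : (8*(r-2)+(c+2)).toNat + 2*7 = (8*r+c).toNat := by omega
        rw [this]; exact pv_encode board who r c hw (by omega) (by omega) h3 (by omega) (by rw [e1, e2]; exact e3)
  · rintro ⟨d, hd, b, t1, t2, t3⟩
    obtain ⟨r, c, h1, h2, h3, h4, e1, hw, hb1⟩ := pv_decode board who b t1
    obtain ⟨r', c', h1', h2', h3', h4', e2, -, hb2⟩ := pv_decode board who (b+d) t2
    obtain ⟨r'', c'', h1'', h2'', h3'', h4'', e3, -, hb3⟩ := pv_decode board who (b+2*d) t3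
    simp only [List.mem_cons, List.not_mem_nil, or_false] at hd
    rcases hd with rfl | rfl | rfl | rfl
    · -- d = 1 : horizontal
      have hr : r' = r ∧ c' = c + 1 ∧ r'' = r ∧ c'' = c + 2 := by omega
      rw [hr.1, hr.2.1] at e2
      rw [hr.2.2.1, hr.2.2.2] at e3
      exact Or.inl ⟨r, c, h1, h2, h3, by omega, by rw [e1, e2], by rw [e2, e3], e3, by rw [e1]; exact hw⟩
    · -- d = 7 : A's up-right diagonal, the lowest bit of the chain is the topmost cell
      have hr : r' = r + 1 ∧ c' = c - 1 ∧ r'' = r + 2 ∧ c'' = c - 2 := by omega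
      rw [hr.1, hr.2.1] at e2
      rw [hr.2.2.1, hr.2.2.2] at e3
      refine Or.inr (Or.inr (Or.inr ⟨r+2, c-2, by omega, by omega, by omega, by omega, ?_, ?_, ?_, ?_⟩))
      · have g1 : r + 2 - 1 = r + 1 := by omega
        have g2 : c - 2 + 1 = c - 1 := by omega
        rw [g1, g2, e3, e2]
      · have g1 : r + 2 - 1 = r + 1 := by omega
        have g2 : c - 2 + 1 = c - 1 := by omega
        have g3 : r + 2 - 2 = r := by omega
        have g4 : c - 2 + 2 = c := by omega
        rw [g1, g2, g3, g4, e2, e1]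
      · have g3 : r + 2 - 2 = r := by omega
        have g4 : c - 2 + 2 = c := by omega
        rw [g3, g4]; exact e1
      · rw [e3]; exact hw
    · -- d = 8 : vertical
      have hr : r' = r + 1 ∧ c' = c ∧ r'' = r + 2 ∧ c'' = c := by omega
      rw [hr.1, hr.2.1] at e2
      rw [hr.2.2.1, hr.2.2.2] at e3
      exact Or.inr (Or.inl ⟨c, r, h3, h4, h1, by omega, by rw [e1, e2], by rw [e2, e3], e3, by rw [e1]; exact hw⟩)
    · -- d = 9 : down-right diagonal
      have hr : r' = r + 1 ∧ c' = c + 1 ∧ r'' = r + 2 ∧ c'' = c + 2 := by omega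
      rw [hr.1, hr.2.1] at e2
      rw [hr.2.2.1, hr.2.2.2] at e3
      exact Or.inr (Or.inr (Or.inl ⟨r, c, h1, by omega, h3, by omega, by rw [e1, e2], by rw [e2, e3], e3, by rw [e1]; exact hw⟩))
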